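-- pv_equiv track=rewrite | github.com/schnmnn/adventofcode | 2023/Day5/day5.py | create_map_dict
-- ===== SOURCE A (Python) =====
-- def create_map_dict(lines):
--     map_names = ['seed-to-soil map:','soil-to-fertilizer map:','fertilizer-to-water map:','water-to-light map:','light-to-temperature map:','temperature-to-humidity map:','humidity-to-location map:']
--     maps = {}
--     current_name = None
--
--     for line in lines:
--         line = line.strip()
--         if line in map_names:
--             current_name = line
--             maps[current_name] = []  # Initialize an empty list for this name
--         elif current_name is not None:
--             # If a name has been encountered, start appending values
--             if line == '':
--                 continue
--             else:
--                 maps[current_name].append(line.split(' '))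
--     return maps
-- ===== SOURCE B (Python) =====
-- HEADERS = frozenset(['seed-to-soil map:', 'soil-to-fertilizer map:', 'fertilizer-to-water map:',
--                      'water-to-light map:', 'light-to-temperature map:',
--                      'temperature-to-humidity map:', 'humidity-to-location map:'])
--
-- def create_map_dict(lines):
--     stripped = [l.strip() for l in lines]
--     idxs = [i for i, l in enumerate(stripped) if l in HEADERS]
--     bounds = zip(idxs, idxs[1:] + [len(stripped)])
--     return {stripped[i]: [l.split(' ') for l in stripped[i + 1:j] if l != '']
--             for i, j in bounds}
-- ===== Notes on version B (the rewrite author's own statement) =====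
-- stated objective: alternative
-- what changed: Replaces A's single streaming pass with mutable current-name state by a two-phase decomposition: strip all lines, collect header indices with enumerate, then build the dict by slicing each header-to-next-header segment and splitting its non-empty lines.
import Mathlib
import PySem

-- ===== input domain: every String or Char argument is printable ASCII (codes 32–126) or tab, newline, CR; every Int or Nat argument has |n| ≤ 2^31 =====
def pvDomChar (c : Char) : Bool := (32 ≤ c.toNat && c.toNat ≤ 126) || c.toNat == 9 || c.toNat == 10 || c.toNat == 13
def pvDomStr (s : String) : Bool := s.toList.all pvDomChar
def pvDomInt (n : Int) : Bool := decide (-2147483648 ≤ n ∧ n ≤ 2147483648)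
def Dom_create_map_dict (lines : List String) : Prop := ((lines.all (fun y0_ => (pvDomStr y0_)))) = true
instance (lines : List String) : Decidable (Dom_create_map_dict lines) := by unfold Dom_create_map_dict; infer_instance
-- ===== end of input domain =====

-- B replaces A's single streaming pass (mutable current-name state) by a two-phase decomposition:
-- collect header indices, then slice each header-to-next-header segment; same O(n) cost ("alternative").

-- ===== PORT A =====
-- the 7 section-header names (shared literal of both Python sources)
def pvHeaders : List String :=
  ["seed-to-soil map:", "soil-to-fertilizer map:", "fertilizer-to-water map:",
   "water-to-light map:", "light-to-temperature map:", "temperature-to-humidity map:",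
   "humidity-to-location map:"]

def pvHdr (l : String) : Bool := decide (l ∈ pvHeaders)

-- l.split(' '): sep " " ≠ "" so PySem.Str.split? is always `some`; getD [] only discharges the Option
def pvSp (l : String) : List String := (PySem.Str.split? l " ").getD []

-- A's loop body after `line = line.strip()` (maps[current_name].append(x) is
-- maps[current_name] = maps[current_name] + [x]; the key is always present when current_name is set)
def pvStep (st : PySem.Dict String (List (List String)) × Option String) (l : String) :
    PySem.Dict String (List (List String)) × Option String :=
  if pvHdr l then (st.1.insert l [], some l)
  else
    match st.2 with
    | none => st
    | some name =>
      if l = "" then st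
      else (st.1.insert name (st.1.getD name [] ++ [pvSp l]), st.2)

def create_map_dict (lines : List String) : List (String × List (List String)) :=
  (lines.foldl (fun st line => pvStep st (PySem.Str.strip line)) (PySem.Dict.empty, none)).1.items

-- ===== PORT B =====
def create_map_dict_alt (lines : List String) : List (String × List (List String)) :=
  let stripped := lines.map (fun l => PySem.Str.strip l)
  let idxs := ((PySem.List.enumerate stripped).filter (fun p => pvHdr p.2)).map (fun p => p.1)
  let bounds := idxs.zip (PySem.List.slice idxs (some 1) none ++ [PySem.List.len stripped])
  (bounds.foldl
    (fun d (p : Int × Int) =>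
      d.insert (PySem.List.pyGetD stripped p.1 "")
        (((PySem.List.slice stripped (some (p.1 + 1)) (some p.2)).filter
            (fun l => decide (l ≠ ""))).map (fun l => pvSp l)))
    PySem.Dict.empty).items

-- ===== PRECONDITION & SPEC =====
def Spec_create_map_dict (lines : List String) (out : List (String × List (List String))) : Prop := out = create_map_dict_alt lines
instance (lines : List String) (out : List (String × List (List String))) : Decidable (Spec_create_map_dict lines out) := by unfold Spec_create_map_dict; infer_instance

-- ===== CLAIM (what is proved, stated in full; the proofs are below) =====
def Claim_equal_create_map_dict : Prop := ∀ (lines : List String), Dom_create_map_dict lines → Spec_create_map_dict lines (create_map_dict lines)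

-- ===== LEMMAS AND PROOFS =====

-- processed body of a section: drop empty lines, split the rest on ' '
def pvProc (t : List String) : List (List String) :=
  (t.filter (fun l => decide (l ≠ ""))).map (fun l => pvSp l)

-- common recursive characterisation both ports are reduced to
def pvBRec : List String → PySem.Dict String (List (List String)) → PySem.Dict String (List (List String))
  | [], d => d
  | l :: s, d =>
    if pvHdr l then pvBRec s (d.insert l (pvProc (s.takeWhile (fun x => !pvHdr x))))
    else pvBRec s d

-- positions (0-based, offset k) of the header lines
def pvNI : List String → Nat → List Nat
  | [], _ => []
  | l :: s, k => if pvHdr l then k :: pvNI s (k + 1) else pvNI s (k + 1)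

def pvNatStep (s : List String) (d : PySem.Dict String (List (List String))) (p : Nat × Nat) :
    PySem.Dict String (List (List String)) :=
  d.insert (s.getD p.1 "") (pvProc ((s.drop (p.1 + 1)).take (p.2 - (p.1 + 1))))

def pvNBounds (s : List String) : List (Nat × Nat) :=
  (pvNI s 0).zip ((pvNI s 0).tail ++ [s.length])

lemma pvNI_shift (s : List String) (k : Nat) : pvNI s (k + 1) = (pvNI s k).map (· + 1) := by
  induction s generalizing k with
  | nil => simp [pvNI]
  | cons l t ih =>
    by_cases h : pvHdr l <;> simp [pvNI, h, ih]

lemma pvE1 (s : List String) (k : Nat) :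
    ((PySem.List.enumerate s (k : Int)).filter (fun p => pvHdr p.2)).map (fun p => p.1)
      = (pvNI s k).map (fun n : Nat => (n : Int)) := by
  induction s generalizing k with
  | nil => simp [PySem.List.enumerate_nil, pvNI]
  | cons l t ih =>
    rw [PySem.List.enumerate_cons,
      show ((k : Int) + 1) = ((k + 1 : Nat) : Int) by push_cast; ring,
      List.filter_cons]
    by_cases h : pvHdr l
    · rw [if_pos (by exact h), List.map_cons, ih (k + 1), pvNI, if_pos h, List.map_cons]
    · rw [if_neg (by simp [h]), ih (k + 1), pvNI, if_neg (by simp [h])]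

lemma pvNI_nil_take (s : List String) (h : pvNI s 0 = []) :
    s.takeWhile (fun x => !pvHdr x) = s := by
  induction s with
  | nil => rfl
  | cons l t ih =>
    by_cases hl : pvHdr l
    · simp [pvNI, hl] at h
    · rw [pvNI, if_neg (by simp [hl]), pvNI_shift] at h
      simp only [List.map_eq_nil_iff] at h
      simp [hl, ih h]

lemma pvNI_cons_take (s : List String) (m : Nat) (ms : List Nat) (h : pvNI s 0 = m :: ms) :
    s.takeWhile (fun x => !pvHdr x) = s.take m := by
  induction s generalizing m ms with
  | nil => simp [pvNI] at h
  | cons l t ih =>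
    by_cases hl : pvHdr l
    · rw [pvNI, if_pos hl] at h
      injection h with h1 h2
      subst h1
      simp [hl]
    · rw [pvNI, if_neg (by simp [hl]), pvNI_shift] at h
      cases ht : pvNI t 0 with
      | nil => rw [ht] at h; simp at h
      | cons m' ms' =>
        rw [ht] at h
        simp only [List.map_cons, List.cons.injEq] at h
        obtain ⟨hm, _⟩ := h
        subst hm
        simp [hl, ih m' ms' ht]

lemma pvBRec_noHdr (s : List String) (d : PySem.Dict String (List (List String)))
    (h : pvNI s 0 = []) : pvBRec s d = d := by
  induction s generalizing d with
  | nil => rfl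
  | cons l t ih =>
    by_cases hl : pvHdr l
    · simp [pvNI, hl] at h
    · rw [pvNI, if_neg (by simp [hl]), pvNI_shift] at h
      simp only [List.map_eq_nil_iff] at h
      simp [pvBRec, hl, ih _ h]

lemma pvZipShift (xs : List Nat) (n : Nat) :
    (xs.map (· + 1)).zip ((xs.map (· + 1)).tail ++ [n + 1])
      = (xs.zip (xs.tail ++ [n])).map (fun p => (p.1 + 1, p.2 + 1)) := by
  cases xs with
  | nil => rfl
  | cons x t =>
    show ((x :: t).map (· + 1)).zip (t.map (· + 1) ++ [n + 1]) = _
    rw [show t.map (· + 1) ++ [n + 1] = (t ++ [n]).map (· + 1) by rw [List.map_append]; rfl]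
    rw [List.zip_map]
    rfl

lemma pvStep_shift (s : List String) (l : String)
    (d : PySem.Dict String (List (List String))) (p : Nat × Nat) :
    pvNatStep (l :: s) d (p.1 + 1, p.2 + 1) = pvNatStep s d p := by
  have hsub : p.2 + 1 - (p.1 + 1 + 1) = p.2 - (p.1 + 1) := by omega
  simp [pvNatStep, hsub]

-- A-side: the streaming loop after a header equals pvBRec
lemma pvTB (s : List String) (d : PySem.Dict String (List (List String)))
    (name : String) (v : List (List String)) :
    (s.foldl pvStep (d.insert name v, some name)).1
      = pvBRec s (d.insert name (v ++ pvProc (s.takeWhile (fun x => !pvHdr x)))) := by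
  induction s generalizing d name v with
  | nil => simp [pvBRec, pvProc]
  | cons l t ih =>
    by_cases hl : pvHdr l
    · have h1 : pvStep (d.insert name v, some name) l = ((d.insert name v).insert l [], some l) := by
        simp [pvStep, hl]
      rw [List.foldl_cons, h1, ih (d.insert name v) l []]
      simp [pvBRec, pvProc, hl]
    · by_cases he : l = ""
      · subst he
        have h1 : pvStep (d.insert name v, some name) "" = (d.insert name v, some name) := by
          simp [pvStep, hl]
        rw [List.foldl_cons, h1, ih d name v]
        simp [pvBRec, pvProc, hl]
      · have h1 : pvStep (d.insert name v, some name) l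
            = (d.insert name (v ++ [pvSp l]), some name) := by
          simp [pvStep, hl, he, PySem.Dict.getD_insert_self, PySem.Dict.insert_insert_self]
        rw [List.foldl_cons, h1, ih d name (v ++ [pvSp l])]
        simp [pvBRec, pvProc, hl, he]

lemma pvTA (s : List String) (d : PySem.Dict String (List (List String))) :
    (s.foldl pvStep (d, none)).1 = pvBRec s d := by
  induction s generalizing d with
  | nil => rfl
  | cons l t ih =>
    by_cases hl : pvHdr l
    · have h1 : pvStep (d, none) l = (d.insert l [], some l) := by simp [pvStep, hl]
      rw [List.foldl_cons, h1, pvTB t d l []]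
      simp [pvBRec, hl]
    · have h1 : pvStep (d, none) l = (d, none) := by simp [pvStep, hl]
      rw [List.foldl_cons, h1, ih d]
      simp [pvBRec, hl]

-- B-side: the bounds fold equals pvBRec
lemma pvM (s : List String) (d : PySem.Dict String (List (List String))) :
    (pvNBounds s).foldl (pvNatStep s) d = pvBRec s d := by
  induction s generalizing d with
  | nil => rfl
  | cons l t ih =>
    have hshift : ∀ (d' : PySem.Dict String (List (List String))),
        ((pvNBounds t).map (fun p => (p.1 + 1, p.2 + 1))).foldl (pvNatStep (l :: t)) d'
          = pvBRec t d' := by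
      intro d'
      rw [List.foldl_map]
      rw [show (fun (x : PySem.Dict String (List (List String))) (y : Nat × Nat) =>
            pvNatStep (l :: t) x (y.1 + 1, y.2 + 1)) = pvNatStep t from
          funext fun x => funext fun y => pvStep_shift t l x y]
      exact ih d'
    by_cases hl : pvHdr l
    · have hu : pvNI (l :: t) 0 = 0 :: (pvNI t 0).map (· + 1) := by
        rw [pvNI, if_pos hl, pvNI_shift]
      cases ht : pvNI t 0 with
      | nil =>
        have hb : pvNBounds (l :: t) = [(0, t.length + 1)] := by
          unfold pvNBounds
          rw [hu, ht]
          rfl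
        rw [hb]
        simp only [List.foldl_cons, List.foldl_nil]
        have h1 : pvNatStep (l :: t) d (0, t.length + 1) = d.insert l (pvProc t) := by
          simp [pvNatStep]
        rw [h1, pvBRec, if_pos hl, pvNI_nil_take t ht, pvBRec_noHdr t _ ht]
      | cons m ms =>
        have hb : pvNBounds (l :: t)
            = (0, m + 1) :: (pvNBounds t).map (fun p => (p.1 + 1, p.2 + 1)) := by
          unfold pvNBounds
          rw [hu, ht]
          show ((0 : Nat) :: ((m :: ms).map (· + 1))).zip
              (((m :: ms).map (· + 1)) ++ [t.length + 1]) = _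
          rw [show ((m :: ms).map (· + 1)) = (m + 1) :: ms.map (· + 1) from rfl]
          rw [List.cons_append, List.zip_cons_cons]
          rw [show (m + 1) :: ms.map (· + 1) = ((m :: ms).map (· + 1)) from rfl]
          rw [show ms.map (· + 1) ++ [t.length + 1]
              = (((m :: ms).map (· + 1)).tail ++ [t.length + 1]) from rfl]
          rw [pvZipShift]
        rw [hb, List.foldl_cons]
        have h1 : pvNatStep (l :: t) d (0, m + 1) = d.insert l (pvProc (t.take m)) := by
          simp [pvNatStep]
        rw [h1, hshift]
        rw [pvBRec, if_pos hl, pvNI_cons_take t m ms ht]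
    · have hu : pvNI (l :: t) 0 = (pvNI t 0).map (· + 1) := by
        rw [pvNI, if_neg (by simp [hl]), pvNI_shift]
      have hb : pvNBounds (l :: t) = (pvNBounds t).map (fun p => (p.1 + 1, p.2 + 1)) := by
        unfold pvNBounds
        rw [hu]
        rw [show (l :: t).length = t.length + 1 from rfl]
        rw [pvZipShift]
      rw [hb, hshift, pvBRec, if_neg (by simp [hl])]

-- the two bridging lemmas
lemma pvA_bridge (lines : List String) :
    create_map_dict lines = (pvBRec (lines.map (fun l => PySem.Str.strip l)) PySem.Dict.empty).items := by
  unfold create_map_dict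
  have h : (lines.map (fun l => PySem.Str.strip l)).foldl pvStep
        ((PySem.Dict.empty : PySem.Dict String (List (List String))), (none : Option String))
      = lines.foldl (fun st line => pvStep st (PySem.Str.strip line))
        (PySem.Dict.empty, none) := by
    rw [List.foldl_map]
  rw [← h, pvTA]

lemma pvE1' (s : List String) :
    ((PySem.List.enumerate s).filter (fun p => pvHdr p.2)).map (fun p => p.1)
      = (pvNI s 0).map (fun n : Nat => (n : Int)) := by
  have h := pvE1 s 0
  simpa using h

lemma pvIntStep (s : List String) (d : PySem.Dict String (List (List String))) (p : Nat × Nat) :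
    d.insert (PySem.List.pyGetD s ((p.1 : Int)) "")
      (((PySem.List.slice s (some ((p.1 : Int) + 1)) (some ((p.2 : Int)))).filter
          (fun l => decide (l ≠ ""))).map (fun l => pvSp l))
      = pvNatStep s d p := by
  rw [show ((p.1 : Int) + 1) = ((p.1 + 1 : Nat) : Int) by push_cast; ring]
  rw [PySem.List.slice_natCast, PySem.List.pyGetD_natCast]
  rfl

lemma pvB_bridge (lines : List String) :
    create_map_dict_alt lines = (pvBRec (lines.map (fun l => PySem.Str.strip l)) PySem.Dict.empty).items := by
  simp only [create_map_dict_alt]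
  rw [pvE1', PySem.List.slice_from_one, ← List.map_tail, PySem.List.len_eq]
  rw [show ((pvNI (lines.map (fun l => PySem.Str.strip l)) 0).tail.map (fun n : Nat => (n : Int))
        ++ [((lines.map (fun l => PySem.Str.strip l)).length : Int)])
      = (((pvNI (lines.map (fun l => PySem.Str.strip l)) 0).tail
          ++ [(lines.map (fun l => PySem.Str.strip l)).length]).map (fun n : Nat => (n : Int)))
      by rw [List.map_append]; rfl]
  rw [List.zip_map, List.foldl_map]
  rw [← pvM (lines.map (fun l => PySem.Str.strip l)) PySem.Dict.empty]
  congr 1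
  apply PySem.List.foldl_congr_mem
  intro acc p _
  exact pvIntStep (lines.map (fun l => PySem.Str.strip l)) acc p

-- ===== VERDICT (by name: the statement is the Claim_ definition above) =====
theorem create_map_dict_spec : Claim_equal_create_map_dict := by
  intro lines _
  unfold Spec_create_map_dict
  rw [pvA_bridge, pvB_bridge]
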